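-- pv_equiv track=rewrite | github.com/shaobai0824/life_prediction | scripts/enhanced_mass_collector.py | get_extended_death_categories
-- ===== SOURCE A (Python) =====
-- from typing import Dict, List, Any, Set, Optional
--
-- def get_extended_death_categories(start_year: int, end_year: int) -> List[str]:
--     """獲取擴展的死亡分類"""
--     categories = []
--
--     # 按年份的分類
--     for year in range(start_year, end_year + 1):
--         categories.extend([
--             f"{year} deaths",
--             f"Deaths in {year}",
--         ])
--
--     # 按十年分類
--     decades = set()
--     for year in range(start_year, end_year + 1):
--         decade = (year // 10) * 10
--         decades.add(decade)
--
--     for decade in sorted(decades):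
--         categories.extend([
--             f"{decade}s deaths",
--             f"Deaths in the {decade}s",
--         ])
--
--     # 按世紀分類
--     if start_year <= 2000 <= end_year:
--         categories.extend([
--             "20th-century deaths",
--             "21st-century deaths",
--         ])
--
--     # 專業分類
--     professional_categories = [
--         "Deaths from cancer",
--         "Deaths from heart disease",
--         "Accidental deaths",
--         "Deaths from pneumonia",
--         "Politicians who died in office",
--         "Actors who died in the 20th century",
--         "Actors who died in the 21st century",
--         "Musicians who died in the 20th century",
--         "Musicians who died in the 21st century",
--         "Writers who died in the 20th century",
--         "Writers who died in the 21st century",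
--         "Scientists who died in the 20th century",
--         "Scientists who died in the 21st century",
--     ]
--
--     categories.extend(professional_categories)
--
--     return categories
-- ===== SOURCE B (Python) =====
-- def get_extended_death_categories(start_year: int, end_year: int) -> list:
--     """Same categories as A, built by preallocating each section and strided-filling it;
--     decade bounds computed arithmetically instead of A's set-collect-and-sort pass."""
--     n_years = end_year + 1 - start_year
--     if n_years < 0:
--         n_years = 0
--     years = range(start_year, end_year + 1)
--     categories = [None] * (2 * n_years)
--     categories[0::2] = (f"{y} deaths" for y in years)
--     categories[1::2] = (f"Deaths in {y}" for y in years)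
--
--     if n_years:
--         first_decade = (start_year // 10) * 10
--         last_decade = (end_year // 10) * 10
--         n_decades = (last_decade - first_decade) // 10 + 1
--         decades = range(first_decade, last_decade + 1, 10)
--         decade_cats = [None] * (2 * n_decades)
--         decade_cats[0::2] = (f"{d}s deaths" for d in decades)
--         decade_cats[1::2] = (f"Deaths in the {d}s" for d in decades)
--         categories += decade_cats
--
--     if start_year <= 2000 <= end_year:
--         categories += ["20th-century deaths", "21st-century deaths"]
--
--     categories += [
--         "Deaths from cancer",
--         "Deaths from heart disease",
--         "Accidental deaths",
--         "Deaths from pneumonia",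
--         "Politicians who died in office",
--         "Actors who died in the 20th century",
--         "Actors who died in the 21st century",
--         "Musicians who died in the 20th century",
--         "Musicians who died in the 21st century",
--         "Writers who died in the 20th century",
--         "Writers who died in the 21st century",
--         "Scientists who died in the 20th century",
--         "Scientists who died in the 21st century",
--     ]
--     return categories
-- ===== Notes on version B (the rewrite author's own statement) =====
-- stated objective: alternative
-- what changed: B sizes each section up front and fills a preallocated list by strided slice assignment from mapped ranges, and computes the decade categories directly from the arithmetic decade bounds (start_year//10*10 .. end_year//10*10 step 10) instead of A's second pass that collects every year's decade into a set and sorts it.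
import Mathlib
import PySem

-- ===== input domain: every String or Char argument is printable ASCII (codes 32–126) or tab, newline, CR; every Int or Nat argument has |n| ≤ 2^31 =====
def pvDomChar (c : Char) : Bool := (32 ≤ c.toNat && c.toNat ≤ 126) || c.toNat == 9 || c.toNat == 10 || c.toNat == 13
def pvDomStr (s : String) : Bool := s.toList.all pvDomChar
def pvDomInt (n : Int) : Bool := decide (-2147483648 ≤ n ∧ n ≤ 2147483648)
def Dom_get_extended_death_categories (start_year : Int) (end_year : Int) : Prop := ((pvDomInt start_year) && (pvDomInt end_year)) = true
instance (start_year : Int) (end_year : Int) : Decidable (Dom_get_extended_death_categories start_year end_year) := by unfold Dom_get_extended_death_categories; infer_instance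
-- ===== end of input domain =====

-- B preallocates each section and strided-fills it from mapped ranges, with the decade list computed from arithmetic decade bounds instead of A's set-collect-then-sort pass (alternative construction).


def pvProfessional : List String :=
  [ "Deaths from cancer",
    "Deaths from heart disease",
    "Accidental deaths",
    "Deaths from pneumonia",
    "Politicians who died in office",
    "Actors who died in the 20th century",
    "Actors who died in the 21st century",
    "Musicians who died in the 20th century",
    "Musicians who died in the 21st century",
    "Writers who died in the 20th century",
    "Writers who died in the 21st century",
    "Scientists who died in the 20th century",
    "Scientists who died in the 21st century" ]

-- the per-year / per-decade append steps, shared verbatim by both ports (same f-strings in both Pythons)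
def pvYearStep (acc : List String) (year : Int) : List String :=
  acc ++ [PySem.Int.toStr year ++ " deaths", "Deaths in " ++ PySem.Int.toStr year]

def pvDecadeStep (acc : List String) (decade : Int) : List String :=
  acc ++ [PySem.Int.toStr decade ++ "s deaths", "Deaths in the " ++ PySem.Int.toStr decade ++ "s"]

-- ===== PORT A =====
def get_extended_death_categories (start_year : Int) (end_year : Int) : List String :=
  let categories : List String := []
  -- for year in range(start_year, end_year + 1): categories.extend([...])
  let categories := (PySem.List.pyRange start_year (end_year + 1) 1).foldl pvYearStep categories
  -- decades = set(); for year in ...: decades.add((year // 10) * 10)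
  let decades : PySem.Set Int :=
    (PySem.List.pyRange start_year (end_year + 1) 1).foldl
      (fun s year => PySem.Set.add s (PySem.Int.floordiv year 10 * 10)) PySem.Set.empty
  -- for decade in sorted(decades): categories.extend([...])
  let categories := (PySem.List.sorted decades (fun x => x) false).foldl pvDecadeStep categories
  -- if start_year <= 2000 <= end_year
  let categories :=
    if start_year ≤ 2000 ∧ 2000 ≤ end_year then
      categories ++ ["20th-century deaths", "21st-century deaths"]
    else categories
  categories ++ pvProfessional

-- ===== PORT B =====
-- port of B's '[None] * (2*n)' preallocation followed by the two strided assignments cats[0::2] / cats[1::2]: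
-- the two generator maps interleaved element-by-element (lengths match by construction, as Python's extended-slice
-- assignment requires)
def pvInterleave {a : Type} : List a → List a → List a
  | x :: xs, y :: ys => x :: y :: pvInterleave xs ys
  | [], ys => ys
  | xs, [] => xs

def get_extended_death_categories_alt (start_year : Int) (end_year : Int) : List String :=
  -- n_years = end_year + 1 - start_year, clamped at 0
  let n_years := max (end_year + 1 - start_year) 0
  let years := PySem.List.pyRange start_year (end_year + 1) 1
  let categories :=
    pvInterleave (years.map (fun y => PySem.Int.toStr y ++ " deaths"))
                 (years.map (fun y => "Deaths in " ++ PySem.Int.toStr y))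
  -- if n_years:
  let categories :=
    if n_years ≠ 0 then
      let first_decade := PySem.Int.floordiv start_year 10 * 10
      let last_decade := PySem.Int.floordiv end_year 10 * 10
      let decades := PySem.List.pyRange first_decade (last_decade + 1) 10
      categories ++
        pvInterleave (decades.map (fun d => PySem.Int.toStr d ++ "s deaths"))
                     (decades.map (fun d => "Deaths in the " ++ PySem.Int.toStr d ++ "s"))
    else categories
  let categories :=
    if start_year ≤ 2000 ∧ 2000 ≤ end_year then
      categories ++ ["20th-century deaths", "21st-century deaths"]
    else categories
  categories ++ pvProfessional

-- ===== PRECONDITION & SPEC =====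
def Spec_get_extended_death_categories (start_year : Int) (end_year : Int) (out : List String) : Prop := out = get_extended_death_categories_alt start_year end_year
instance (start_year : Int) (end_year : Int) (out : List String) : Decidable (Spec_get_extended_death_categories start_year end_year out) := by unfold Spec_get_extended_death_categories; infer_instance

-- ===== CLAIM (what is proved, stated in full; the proofs are below) =====
def Claim_equal_get_extended_death_categories : Prop := ∀ (start_year : Int) (end_year : Int), Dom_get_extended_death_categories start_year end_year → Spec_get_extended_death_categories start_year end_year (get_extended_death_categories start_year end_year)

-- ===== LEMMAS AND PROOFS =====

-- A's extend-two-items loop produces the interleaving of the two mapped lists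
theorem pv_foldl_two_eq_interleave {k : Type} (f g : k → String) (l : List k) (acc : List String) :
    l.foldl (fun acc x => acc ++ [f x, g x]) acc = acc ++ pvInterleave (l.map f) (l.map g) := by
  induction l generalizing acc with
  | nil => simp [pvInterleave]
  | cons x xs ih => simp [List.foldl_cons, ih, pvInterleave]

theorem pv_foldl_year (l : List Int) (acc : List String) :
    l.foldl pvYearStep acc
      = acc ++ pvInterleave (l.map (fun y => PySem.Int.toStr y ++ " deaths"))
                            (l.map (fun y => "Deaths in " ++ PySem.Int.toStr y)) :=
  pv_foldl_two_eq_interleave _ _ _ _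

theorem pv_foldl_decade (l : List Int) (acc : List String) :
    l.foldl pvDecadeStep acc
      = acc ++ pvInterleave (l.map (fun d => PySem.Int.toStr d ++ "s deaths"))
                            (l.map (fun d => "Deaths in the " ++ PySem.Int.toStr d ++ "s")) :=
  pv_foldl_two_eq_interleave _ _ _ _

-- A's decade set is the set of the mapped year range
theorem pv_decades_eq_ofList (a b : Int) :
    (PySem.List.pyRange a b 1).foldl
      (fun s year => PySem.Set.add s (PySem.Int.floordiv year 10 * 10)) PySem.Set.empty
    = PySem.Set.ofList ((PySem.List.pyRange a b 1).map (fun y => PySem.Int.floordiv y 10 * 10)) := by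
  rw [PySem.Set.ofList_eq_foldl, List.foldl_map]
  rfl

-- membership in B's arithmetic decade range
theorem pv_mem_decade_range (a b x : Int) (hab : a ≤ b) :
    x ∈ PySem.List.pyRange (PySem.Int.floordiv a 10 * 10) (PySem.Int.floordiv b 10 * 10 + 1) 10
      ↔ ∃ y, (a ≤ y ∧ y < b + 1) ∧ x = PySem.Int.floordiv y 10 * 10 := by
  rw [PySem.List.mem_pyRange_iff_of_pos (by norm_num)]
  rw [PySem.Int.floordiv_eq_ediv_of_pos (by norm_num) (a := a),
      PySem.Int.floordiv_eq_ediv_of_pos (by norm_num) (a := b)]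
  constructor
  · rintro ⟨h1, h2, h3⟩
    refine ⟨max a x, by omega, ?_⟩
    rw [PySem.Int.floordiv_eq_ediv_of_pos (by norm_num)]
    omega
  · rintro ⟨y, ⟨hy1, hy2⟩, rfl⟩
    rw [PySem.Int.floordiv_eq_ediv_of_pos (by norm_num)]
    refine ⟨by omega, by omega, ?_⟩
    omega

-- B's arithmetic decade range is strictly increasing
theorem pv_pairwise_decade_range (f l : Int) :
    (PySem.List.pyRange f (l + 1) 10).Pairwise (· < ·) := by
  rw [PySem.List.pyRange_of_pos _ _ (by norm_num)]
  rw [List.pairwise_map]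
  exact List.pairwise_lt_range.imp (by intro i j h; omega)

-- main lemma: sorted(decade set) = arithmetic decade range, for a nonempty year range
theorem pv_sorted_decades (a b : Int) (hab : a ≤ b) :
    PySem.List.sorted
      ((PySem.List.pyRange a (b + 1) 1).foldl
        (fun s year => PySem.Set.add s (PySem.Int.floordiv year 10 * 10)) PySem.Set.empty)
      (fun x => x) false
    = PySem.List.pyRange (PySem.Int.floordiv a 10 * 10) (PySem.Int.floordiv b 10 * 10 + 1) 10 := by
  rw [pv_decades_eq_ofList]
  apply PySem.List.sorted_eq_of_perm_of_pairwise_lt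
  · apply (List.perm_ext_iff_of_nodup ?_ ?_).mpr
    · intro x
      rw [pv_mem_decade_range a b x hab, PySem.Set.mem_ofList, List.mem_map]
      simp only [PySem.List.mem_pyRange_one]
      constructor
      · rintro ⟨y, hy, hx⟩
        exact ⟨y, hy, hx.symm⟩
      · rintro ⟨y, hy, hx⟩
        exact ⟨y, hy, hx.symm⟩
    · exact (pv_pairwise_decade_range _ _).nodup
    · exact PySem.Set.nodup_ofList _
  · exact pv_pairwise_decade_range _ _

theorem pv_sorted_decades_empty (a b : Int) (hab : ¬ a ≤ b) :
    PySem.List.sorted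
      ((PySem.List.pyRange a (b + 1) 1).foldl
        (fun s year => PySem.Set.add s (PySem.Int.floordiv year 10 * 10)) PySem.Set.empty)
      (fun x => x) false = [] := by
  rw [PySem.List.pyRange_one_eq_nil (by omega)]
  rfl

-- ===== VERDICT (by name: the statement is the Claim_ definition above) =====
theorem get_extended_death_categories_spec : Claim_equal_get_extended_death_categories := by
  intro a b _
  unfold Spec_get_extended_death_categories get_extended_death_categories get_extended_death_categories_alt
  dsimp only
  by_cases hab : a ≤ b
  · rw [pv_sorted_decades a b hab, pv_foldl_year, pv_foldl_decade]
    have hn : max (b + 1 - a) 0 ≠ 0 := by omega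
    simp [hn, List.append_assoc]
  · rw [pv_sorted_decades_empty a b hab, pv_foldl_year]
    have hn : max (b + 1 - a) 0 = 0 := by omega
    simp [hn]
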